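-- pv_equiv track=rewrite | github.com/imranpollob/smart-contract-hgnn | src/hypergraph/features.py | _compute_state_var_reentrancy_flags
-- ===== SOURCE A (Python) =====
-- def _compute_state_var_reentrancy_flags(
--     call_sites: list[dict], state_vars: list[dict]
-- ) -> tuple[dict[str, bool], dict[str, bool]]:
--     """
--     Aggregate per-call-site reentrancy context up to state variables.
--
--     Returns:
--         (written_after_call, read_before_call): two dicts keyed by state var
--         name. A var is True in `written_after_call` if any call site has it in
--         its writes_after_call list, and True in `read_before_call` if any call
--         site has it in its reads_before_call list.
--     """
--     var_names = {v["name"] for v in state_vars}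
--     written_after: dict[str, bool] = {v: False for v in var_names}
--     read_before: dict[str, bool] = {v: False for v in var_names}
--
--     for cs in call_sites:
--         for vn in cs.get("writes_after_call", []) or []:
--             if vn in var_names:
--                 written_after[vn] = True
--         for vn in cs.get("reads_before_call", []) or []:
--             if vn in var_names:
--                 read_before[vn] = True
--
--     return written_after, read_before
-- ===== SOURCE B (Python) =====
-- def _compute_state_var_reentrancy_flags(call_sites, state_vars):
--     """Variable-major formulation: for each state-variable name, scan the
--     call sites once asking whether ANY of them lists it (short-circuiting),
--     instead of iterating call sites and toggling pre-initialized flags."""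
--     def flagged(key):
--         return {v: any(v in (cs.get(key, []) or []) for cs in call_sites)
--                 for v in {sv["name"] for sv in state_vars}}
--     return flagged("writes_after_call"), flagged("reads_before_call")
-- ===== Notes on version B (the rewrite author's own statement) =====
-- stated objective: alternative
-- what changed: B inverts the loop nesting: instead of iterating call sites and toggling pre-initialized flag dicts per mentioned name, it iterates the variable names and decides each flag with a short-circuiting any() over the call sites, so no mutable flag dicts and no membership test against var_names exist at all.
import Mathlib
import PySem

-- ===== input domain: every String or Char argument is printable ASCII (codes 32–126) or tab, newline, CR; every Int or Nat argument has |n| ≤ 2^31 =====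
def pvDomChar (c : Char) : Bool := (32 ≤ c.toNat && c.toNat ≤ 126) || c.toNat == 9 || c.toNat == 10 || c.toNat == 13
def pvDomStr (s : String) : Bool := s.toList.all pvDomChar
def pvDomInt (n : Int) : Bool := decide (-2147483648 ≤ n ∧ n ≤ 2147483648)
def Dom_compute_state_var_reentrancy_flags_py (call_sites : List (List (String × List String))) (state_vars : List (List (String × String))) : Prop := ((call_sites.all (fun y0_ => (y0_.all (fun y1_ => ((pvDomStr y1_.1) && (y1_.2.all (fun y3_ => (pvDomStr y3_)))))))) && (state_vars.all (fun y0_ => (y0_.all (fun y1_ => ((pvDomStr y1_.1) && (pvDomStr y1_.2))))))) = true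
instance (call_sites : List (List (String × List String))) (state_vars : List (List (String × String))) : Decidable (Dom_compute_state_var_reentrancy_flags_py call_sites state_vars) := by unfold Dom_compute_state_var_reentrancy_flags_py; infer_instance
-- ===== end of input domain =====

-- B inverts the loop nesting: per variable name, a short-circuiting any() over the
-- call sites decides each flag; A toggles pre-initialized flag dicts per call site
-- (objective: alternative).

-- ===== PORT A =====
-- Notes: `v["name"]` raises KeyError when absent — excluded by Pre_; here `.getD ""`.
-- `cs.get(k, []) or []` : on our List-valued dicts `or []` is the identity, ported as getD.
def compute_state_var_reentrancy_flags_py (call_sites : List (List (String × List String))) (state_vars : List (List (String × String))) : (List (String × Bool)) × (List (String × Bool)) :=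
  let var_names : PySem.Set String :=
    PySem.Set.ofList (state_vars.map (fun v => ((PySem.Dict.mk v).get? "name").getD ""))
  -- {v: False for v in var_names}: keys of a set are distinct, so the comprehension's items
  -- are exactly the mapped pairs
  let written_after : PySem.Dict String Bool := PySem.Dict.mk (var_names.map (fun v => (v, false)))
  let read_before : PySem.Dict String Bool := PySem.Dict.mk (var_names.map (fun v => (v, false)))
  let mark := fun (d : PySem.Dict String Bool) (vn : String) =>
    if PySem.Set.contains var_names vn then d.insert vn true else d
  let res := call_sites.foldl (fun p c =>
      ((PySem.Dict.getD (PySem.Dict.mk c) "writes_after_call" []).foldl mark p.1,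
       (PySem.Dict.getD (PySem.Dict.mk c) "reads_before_call" []).foldl mark p.2))
    (written_after, read_before)
  (res.1.items, res.2.items)

-- ===== PORT B =====
-- helper `flagged(key)`: {v: any(v in (cs.get(key,[]) or []) for cs in call_sites) for v in names}
def pvFlagged (call_sites : List (List (String × List String))) (names : PySem.Set String) (key : String) : List (String × Bool) :=
  names.map (fun v => (v, call_sites.any (fun cs => (PySem.Dict.getD (PySem.Dict.mk cs) key []).contains v)))

def compute_state_var_reentrancy_flags_py_alt (call_sites : List (List (String × List String))) (state_vars : List (List (String × String))) : (List (String × Bool)) × (List (String × Bool)) :=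
  let names : PySem.Set String :=
    PySem.Set.ofList (state_vars.map (fun v => ((PySem.Dict.mk v).get? "name").getD ""))
  (pvFlagged call_sites names "writes_after_call",
   pvFlagged call_sites names "reads_before_call")

-- ===== PRECONDITION & SPEC =====
-- Pre_ excludes exactly the inputs where some state-var dict lacks the key "name":
-- there Python A (and Python B) raise KeyError.
def Pre_compute_state_var_reentrancy_flags_py (call_sites : List (List (String × List String))) (state_vars : List (List (String × String))) : Prop :=
  state_vars.all (fun v => (PySem.Dict.mk v).contains "name") = true
instance (call_sites : List (List (String × List String))) (state_vars : List (List (String × String))) : Decidable (Pre_compute_state_var_reentrancy_flags_py call_sites state_vars) := by unfold Pre_compute_state_var_reentrancy_flags_py; infer_instance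
def pvWitness_compute_state_var_reentrancy_flags_py : (List (List (String × List String))) × (List (List (String × String))) :=
  ([[("writes_after_call", ["x", "y"])], [("reads_before_call", ["y"])]], [[("name", "x")], [("name", "y")]])
def Spec_compute_state_var_reentrancy_flags_py (call_sites : List (List (String × List String))) (state_vars : List (List (String × String))) (out : (List (String × Bool)) × (List (String × Bool))) : Prop := out = compute_state_var_reentrancy_flags_py_alt call_sites state_vars
instance (call_sites : List (List (String × List String))) (state_vars : List (List (String × String))) (out : (List (String × Bool)) × (List (String × Bool))) : Decidable (Spec_compute_state_var_reentrancy_flags_py call_sites state_vars out) := by unfold Spec_compute_state_var_reentrancy_flags_py; infer_instance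

-- ===== CLAIM (what is proved, stated in full; the proofs are below) =====
def Claim_equal_compute_state_var_reentrancy_flags_py : Prop := ∀ (call_sites : List (List (String × List String))) (state_vars : List (List (String × String))), Dom_compute_state_var_reentrancy_flags_py call_sites state_vars → Pre_compute_state_var_reentrancy_flags_py call_sites state_vars → Spec_compute_state_var_reentrancy_flags_py call_sites state_vars (compute_state_var_reentrancy_flags_py call_sites state_vars)

-- ===== LEMMAS AND PROOFS =====

-- overwriting an existing key of the comprehension-shaped dict updates the mapped value in place
lemma insert_map_true (names : List String) (f : String → Bool) (vn : String) (h : vn ∈ names) :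
    (PySem.Dict.mk (names.map (fun v => (v, f v)))).insert vn true
      = PySem.Dict.mk (names.map (fun v => (v, if v = vn then true else f v))) := by
  have hc : ((PySem.Dict.mk (names.map (fun v => (v, f v)))).contains vn) = true := by
    simp only [PySem.Dict.contains, List.any_map, List.any_eq_true]
    exact ⟨vn, h, by simp⟩
  simp only [PySem.Dict.insert, hc, if_pos]
  congr 1
  rw [List.map_map]
  apply List.map_congr_left
  intro v hv
  by_cases hvv : v = vn <;> simp [hvv]

-- marking one writes/reads list over the flag dict = pointwise OR with membership in that list
lemma foldl_mark (names : List String) :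
    ∀ (l : List String) (f : String → Bool),
    l.foldl (fun d vn => if PySem.Set.contains names vn then d.insert vn true else d)
        (PySem.Dict.mk (names.map (fun v => (v, f v))))
      = PySem.Dict.mk (names.map (fun v => (v, f v || l.contains v))) := by
  intro l
  induction l with
  | nil => intro f; simp
  | cons vn l ih =>
    intro f
    rw [List.foldl_cons]
    by_cases h : vn ∈ names
    · have hc : PySem.Set.contains names vn = true := by
        simpa [PySem.Set.contains, List.contains_iff_mem] using h
      rw [hc, if_pos rfl, insert_map_true names f vn h, ih]
      congr 1
      apply List.map_congr_left
      intro v hv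
      by_cases hvv : v = vn <;> simp [hvv]
    · have hc : PySem.Set.contains names vn = false := by
        simpa [PySem.Set.contains, List.contains_iff_mem] using h
      rw [hc]
      simp only [Bool.false_eq_true, if_false]
      rw [ih]
      congr 1
      apply List.map_congr_left
      intro v hv
      have hvv : v ≠ vn := fun e => h (e ▸ hv)
      simp [hvv]

-- folding the mark loop over all call sites = OR with "some call site's list contains v"
lemma foldl_sites (names : List String) (wOf : List (String × List String) → List String) :
    ∀ (cs : List (List (String × List String))) (f : String → Bool),
    cs.foldl (fun d c =>
        (wOf c).foldl (fun d vn => if PySem.Set.contains names vn then d.insert vn true else d) d)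
        (PySem.Dict.mk (names.map (fun v => (v, f v))))
      = PySem.Dict.mk (names.map (fun v => (v, f v || cs.any (fun c => (wOf c).contains v)))) := by
  intro cs
  induction cs with
  | nil =>
    intro f; simp
  | cons c cs ih =>
    intro f
    rw [List.foldl_cons, foldl_mark names (wOf c) f, ih]
    congr 1
    apply List.map_congr_left
    intro v hv
    simp [Bool.or_assoc]

-- ===== VERDICT (by name: the statement is the Claim_ definition above) =====
theorem compute_state_var_reentrancy_flags_py_spec : Claim_equal_compute_state_var_reentrancy_flags_py := by
  intro call_sites state_vars _dom _pre
  unfold Spec_compute_state_var_reentrancy_flags_py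
  unfold compute_state_var_reentrancy_flags_py compute_state_var_reentrancy_flags_py_alt pvFlagged
  have hA := PySem.List.foldl_prod_mk
    (fun (d : PySem.Dict String Bool) (c : List (String × List String)) =>
      (PySem.Dict.getD (PySem.Dict.mk c) "writes_after_call" []).foldl
        (fun d vn => if PySem.Set.contains (PySem.Set.ofList (state_vars.map (fun v => ((PySem.Dict.mk v).get? "name").getD ""))) vn then d.insert vn true else d) d)
    (fun (d : PySem.Dict String Bool) (c : List (String × List String)) =>
      (PySem.Dict.getD (PySem.Dict.mk c) "reads_before_call" []).foldl
        (fun d vn => if PySem.Set.contains (PySem.Set.ofList (state_vars.map (fun v => ((PySem.Dict.mk v).get? "name").getD ""))) vn then d.insert vn true else d) d)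
    call_sites
    (PySem.Dict.mk ((PySem.Set.ofList (state_vars.map (fun v => ((PySem.Dict.mk v).get? "name").getD ""))).map (fun v => (v, false))))
    (PySem.Dict.mk ((PySem.Set.ofList (state_vars.map (fun v => ((PySem.Dict.mk v).get? "name").getD ""))).map (fun v => (v, false))))
  simp only [hA]
  rw [foldl_sites _ (fun c => PySem.Dict.getD (PySem.Dict.mk c) "writes_after_call" []),
      foldl_sites _ (fun c => PySem.Dict.getD (PySem.Dict.mk c) "reads_before_call" [])]
  simp
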